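-- pv_equiv track=rewrite | github.com/flairNLP/familiarity | src/familiarity/utils.py | cumsum_until
-- ===== SOURCE A (Python) =====
-- from typing import Any, Dict, Iterator, List, Tuple
--
-- def cumsum_until(counts: List[int], k: int) -> List[int]:
--     """Cummulative sum of list of counts until k entries."""
--     cumsum = 0
--     result = []
--
--     for count in counts:
--         if cumsum + count >= k:
--             result.append(k - cumsum)
--             break
--         else:
--             cumsum += count
--             result.append(count)
--
--     return result
-- ===== SOURCE B (Python) =====
-- def cumsum_until(counts, k):
--     """Cummulative sum of list of counts until k entries."""
--     prefix = [0]
--     for c in counts: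
--         prefix.append(prefix[-1] + c)
--     i = next((j for j in range(len(counts)) if prefix[j + 1] >= k), None)
--     if i is None:
--         return list(counts)
--     return counts[:i] + [k - prefix[i]]
-- ===== Notes on version B (the rewrite author's own statement) =====
-- stated objective: alternative
-- what changed: Replaces A's single emit-as-you-go loop with early break by a two-phase table approach: build the full prefix-sum table first, then find the first index whose prefix sum reaches k and splice counts[:i] + [k - prefix[i]] (or return the list unchanged when no index is found).
import Mathlib
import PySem

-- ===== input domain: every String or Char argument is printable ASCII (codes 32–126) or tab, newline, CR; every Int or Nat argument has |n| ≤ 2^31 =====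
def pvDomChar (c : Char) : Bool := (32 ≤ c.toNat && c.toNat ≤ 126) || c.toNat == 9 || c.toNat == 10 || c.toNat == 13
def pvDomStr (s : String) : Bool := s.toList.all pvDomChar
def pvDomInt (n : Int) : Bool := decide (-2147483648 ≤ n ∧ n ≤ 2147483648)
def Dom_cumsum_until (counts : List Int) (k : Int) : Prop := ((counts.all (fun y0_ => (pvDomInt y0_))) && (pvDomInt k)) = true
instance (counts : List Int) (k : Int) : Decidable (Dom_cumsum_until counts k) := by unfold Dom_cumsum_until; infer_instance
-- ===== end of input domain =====

-- B replaces A's emit-as-you-go early-break loop by building the full prefix-sum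
-- table first and then locating/splicing at the first index whose prefix sum
-- reaches k (objective: alternative decomposition, same linear cost).

-- ===== PORT A =====
-- loop over counts carrying the running sum; `break` becomes stopping the recursion.
def cumsumGoA (k cumsum : Int) : List Int → List Int
  | [] => []
  | c :: rest =>
    if cumsum + c ≥ k then [k - cumsum]
    else c :: cumsumGoA k (cumsum + c) rest

def cumsum_until (counts : List Int) (k : Int) : List Int :=
  cumsumGoA k 0 counts

-- ===== PORT B =====
-- `prefix[-1]` on the (always nonempty) accumulator is ported as getLastD (exact here).
def cumsum_until_alt (counts : List Int) (k : Int) : List Int :=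
  let pre : List Int := counts.foldl (fun acc c => acc ++ [acc.getLastD 0 + c]) [0]
  match (List.range counts.length).find? (fun j => decide (pre.getD (j + 1) 0 ≥ k)) with
  | none => counts
  | some i => counts.take i ++ [k - pre.getD i 0]

-- ===== PRECONDITION & SPEC =====
def Spec_cumsum_until (counts : List Int) (k : Int) (out : List Int) : Prop := out = cumsum_until_alt counts k
instance (counts : List Int) (k : Int) (out : List Int) : Decidable (Spec_cumsum_until counts k out) := by unfold Spec_cumsum_until; infer_instance

-- ===== CLAIM (what is proved, stated in full; the proofs are below) =====
def Claim_equal_cumsum_until : Prop := ∀ (counts : List Int) (k : Int), Dom_cumsum_until counts k → Spec_cumsum_until counts k (cumsum_until counts k)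

-- ===== LEMMAS AND PROOFS =====

-- The foldl that builds B's prefix table is scanl.
theorem cumsum_prefix_eq_scanl (xs : List Int) :
    ∀ (pre : List Int) (s : Int),
      List.foldl (fun acc c => acc ++ [acc.getLastD 0 + c]) (pre ++ [s]) xs
        = pre ++ List.scanl (· + ·) s xs := by
  induction xs with
  | nil => intro pre s; simp
  | cons c rest ih =>
    intro pre s
    have hlast : (pre ++ [s]).getLastD 0 = s := by
      simp [List.getLastD_eq_getLast?]
    calc List.foldl (fun acc c => acc ++ [acc.getLastD 0 + c]) (pre ++ [s]) (c :: rest)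
        = List.foldl (fun acc c => acc ++ [acc.getLastD 0 + c]) ((pre ++ [s]) ++ [s + c]) rest := by
          rw [List.foldl_cons, hlast]
      _ = (pre ++ [s]) ++ List.scanl (· + ·) (s + c) rest := ih (pre ++ [s]) (s + c)
      _ = pre ++ List.scanl (· + ·) s (c :: rest) := by
          rw [List.scanl_cons, List.append_assoc]; simp

-- shifting the base of scanl shifts every entry
theorem scanl_add_shift (a : Int) (xs : List Int) :
    ∀ (b : Int), List.scanl (· + ·) (a + b) xs = (List.scanl (· + ·) b xs).map (a + ·) := by
  induction xs with
  | nil => intro b; simp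
  | cons x rest ih =>
    intro b
    rw [List.scanl_cons, List.scanl_cons, List.map_cons]
    congr 1
    rw [add_assoc]
    exact ih (b + x)

theorem find?_congr_mem {α : Type} (l : List α) (p q : α → Bool)
    (h : ∀ x ∈ l, p x = q x) : l.find? p = l.find? q := by
  induction l with
  | nil => rfl
  | cons a t ih =>
    simp only [List.find?_cons]
    rw [h a (by simp)]
    cases q a
    · exact ih (fun x hx => h x (by simp [hx]))
    · rfl

-- proof-side restatement of B on the scanl table
def cumsumBs (counts : List Int) (k : Int) : List Int :=
  match (List.range counts.length).find? (fun j => decide ((List.scanl (· + ·) 0 counts).getD (j + 1) 0 ≥ k)) with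
  | none => counts
  | some i => counts.take i ++ [k - (List.scanl (· + ·) 0 counts).getD i 0]

theorem alt_eq_Bs (counts : List Int) (k : Int) :
    cumsum_until_alt counts k = cumsumBs counts k := by
  unfold cumsum_until_alt cumsumBs
  have h := cumsum_prefix_eq_scanl counts [] 0
  simp only [List.nil_append] at h
  rw [h]

theorem getD_map_add (c : Int) (l : List Int) (i : ℕ) (h : i < l.length) :
    (l.map (c + ·)).getD i 0 = c + l.getD i 0 := by
  rw [List.getD_eq_getElem _ _ (by simpa using h), List.getD_eq_getElem _ _ h]
  simp

-- B's table form satisfies A's recursion equation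
theorem Bs_cons (c : Int) (rest : List Int) (k : Int) :
    cumsumBs (c :: rest) k = if k ≤ c then [k] else c :: cumsumBs rest (k - c) := by
  unfold cumsumBs
  have hscan : List.scanl (· + ·) 0 (c :: rest)
      = 0 :: (List.scanl (· + ·) 0 rest).map (c + ·) := by
    rw [List.scanl_cons]
    congr 1
    have := scanl_add_shift c rest 0
    simpa [add_comm] using this
  have hrange : List.range (c :: rest).length
      = 0 :: (List.range rest.length).map (· + 1) := by
    simp [List.range_succ_eq_map]
  rw [hscan, hrange]
  simp only [List.find?_cons]
  have hp0 : (List.scanl (· + ·) 0 rest).getD 0 0 = 0 := by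
    cases rest <;> simp
  have hgd : ((0 : Int) :: (List.scanl (· + ·) 0 rest).map (c + ·)).getD (0 + 1) 0 = c := by
    simp only [List.getD_cons_succ]
    rw [getD_map_add c _ 0 (by simp)]
    rw [hp0]; ring
  by_cases hk : k ≤ c
  · have hd : decide (((0 : Int) :: (List.scanl (· + ·) 0 rest).map (c + ·)).getD (0 + 1) 0 ≥ k) = true := by
      rw [hgd]; simpa using hk
    rw [hd, if_pos hk]
    simp
  · have hd : decide (((0 : Int) :: (List.scanl (· + ·) 0 rest).map (c + ·)).getD (0 + 1) 0 ≥ k) = false := by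
      rw [hgd]; simpa using hk
    rw [hd, if_neg hk]
    rw [List.find?_map]
    have hcongr : (List.range rest.length).find?
        ((fun j => decide (((0 : Int) :: (List.scanl (· + ·) 0 rest).map (c + ·)).getD (j + 1) 0 ≥ k)) ∘ (· + 1))
        = (List.range rest.length).find? (fun j => decide ((List.scanl (· + ·) 0 rest).getD (j + 1) 0 ≥ k - c)) := by
      apply find?_congr_mem
      intro j hj
      have hj' : j < rest.length := by simpa using hj
      simp only [Function.comp]
      rw [List.getD_cons_succ, getD_map_add c _ (j + 1) (by simp; omega)]
      rw [decide_eq_decide]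
      omega
    rw [hcongr]
    cases hfind : (List.range rest.length).find? (fun j => decide ((List.scanl (· + ·) 0 rest).getD (j + 1) 0 ≥ k - c)) with
    | none => simp
    | some i =>
      have hi : i < rest.length := by
        have := List.mem_of_find?_eq_some hfind
        simpa using this
      simp only [Option.map_some]
      rw [List.take_succ_cons, List.getD_cons_succ,
        getD_map_add c _ i (by simp; omega)]
      simp only [List.cons_append, List.cons.injEq, true_and]
      congr 2
      ring

theorem goA_eq_Bs (counts : List Int) : ∀ (k cumsum : Int),
    cumsumGoA k cumsum counts = cumsumBs counts (k - cumsum) := by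
  induction counts with
  | nil => intro k cumsum; simp [cumsumGoA, cumsumBs]
  | cons c rest ih =>
    intro k cumsum
    rw [Bs_cons]
    simp only [cumsumGoA]
    by_cases h : cumsum + c ≥ k
    · rw [if_pos h, if_pos (by omega)]
    · rw [if_neg h, if_neg (by omega), ih k (cumsum + c)]
      congr 1
      congr 1
      ring

-- ===== VERDICT (by name: the statement is the Claim_ definition above) =====
theorem cumsum_until_spec : Claim_equal_cumsum_until := by
  intro counts k _
  unfold Spec_cumsum_until cumsum_until
  rw [alt_eq_Bs, goA_eq_Bs]
  norm_num
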